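-- pv_equiv track=rewrite | github.com/kyle-gehring/sqlsentinel | src/sqlsentinel/health/checks.py | aggregate_health_status
-- ===== SOURCE A (Python) =====
-- from typing import Any
--
-- def aggregate_health_status(checks: dict[str, Any]) -> str:
--     """
--     Aggregate individual check statuses into overall health status.
--
--     Args:
--         checks: Dictionary of individual health check results
--
--     Returns:
--         Overall status: 'healthy', 'degraded', or 'unhealthy'
--     """
--     statuses = [check.get("status") for check in checks.values()]
--
--     if "unhealthy" in statuses:
--         return "unhealthy"
--     elif "degraded" in statuses:
--         return "degraded"
--     else:
--         return "healthy"
-- ===== SOURCE B (Python) =====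
-- def aggregate_health_status(checks: dict, ) -> str:
--     """Rank-and-reduce: map each status to a severity, take the max in one pass."""
--     rank = {"unhealthy": 2, "degraded": 1}
--     worst = max((rank.get(check.get("status"), 0) for check in checks.values()), default=0)
--     return {0: "healthy", 1: "degraded", 2: "unhealthy"}[worst]
-- ===== Notes on version B (the rewrite author's own statement) =====
-- stated objective: idiomatic
-- what changed: Replaces A's build-a-status-list-then-two-membership-scans with a single rank-and-reduce pass: each check's status maps to an integer severity and a max fold (default 0) picks the worst, translated back to its label.
import Mathlib
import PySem

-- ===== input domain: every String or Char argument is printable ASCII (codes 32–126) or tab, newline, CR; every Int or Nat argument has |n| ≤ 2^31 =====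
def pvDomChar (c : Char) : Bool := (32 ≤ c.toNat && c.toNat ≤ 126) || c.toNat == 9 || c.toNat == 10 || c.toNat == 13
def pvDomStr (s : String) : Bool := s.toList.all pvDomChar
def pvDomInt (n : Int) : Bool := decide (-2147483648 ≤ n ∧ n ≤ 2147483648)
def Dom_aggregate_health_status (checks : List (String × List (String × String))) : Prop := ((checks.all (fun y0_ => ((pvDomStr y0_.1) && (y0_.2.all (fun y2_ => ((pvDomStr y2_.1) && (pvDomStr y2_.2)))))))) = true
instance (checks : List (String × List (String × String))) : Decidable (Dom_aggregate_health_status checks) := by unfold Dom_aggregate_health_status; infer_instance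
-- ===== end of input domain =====

-- B: one rank-and-reduce pass (max severity with default 0) instead of A's status list plus two membership scans; same return value.

-- ===== PORT A =====
def aggregate_health_status (checks : List (String × List (String × String))) : String :=
  let statuses := checks.map (fun check => (PySem.Dict.ofList check.2).get? "status")
  if statuses.contains (some "unhealthy") then "unhealthy"
  else if statuses.contains (some "degraded") then "degraded"
  else "healthy"

-- ===== PORT B =====
-- rank.get(check.get("status"), 0)
def ahsRank (check : List (String × String)) : Nat :=
  match (PySem.Dict.ofList check).get? "status" with
  | some "unhealthy" => 2
  | some "degraded" => 1
  | _ => 0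

def aggregate_health_status_alt (checks : List (String × List (String × String))) : String :=
  let worst := checks.foldl (fun a check => max a (ahsRank check.2)) 0
  -- {0: "healthy", 1: "degraded", 2: "unhealthy"}[worst]
  if worst == 2 then "unhealthy" else if worst == 1 then "degraded" else "healthy"

-- ===== PRECONDITION & SPEC =====
def Spec_aggregate_health_status (checks : List (String × List (String × String))) (out : String) : Prop := out = aggregate_health_status_alt checks
instance (checks : List (String × List (String × String))) (out : String) : Decidable (Spec_aggregate_health_status checks out) := by unfold Spec_aggregate_health_status; infer_instance

-- ===== CLAIM (what is proved, stated in full; the proofs are below) =====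
def Claim_equal_aggregate_health_status : Prop := ∀ (checks : List (String × List (String × String))), Dom_aggregate_health_status checks → Spec_aggregate_health_status checks (aggregate_health_status checks)

-- ===== LEMMAS AND PROOFS =====

lemma ahsRank_le (c : List (String × String)) : ahsRank c ≤ 2 := by
  unfold ahsRank
  rcases (PySem.Dict.ofList c).get? "status" with _ | s
  · simp
  · by_cases h1 : s = "unhealthy" <;> by_cases h2 : s = "degraded" <;> simp [h1, h2]

lemma ahsRank_eq_two (c : List (String × String)) :
    (ahsRank c = 2) ↔ (PySem.Dict.ofList c).get? "status" = some "unhealthy" := by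
  unfold ahsRank
  rcases (PySem.Dict.ofList c).get? "status" with _ | s
  · simp
  · by_cases h1 : s = "unhealthy" <;> by_cases h2 : s = "degraded" <;> simp_all

lemma ahsRank_eq_one (c : List (String × String)) :
    (ahsRank c = 1) ↔ (PySem.Dict.ofList c).get? "status" = some "degraded" := by
  unfold ahsRank
  rcases (PySem.Dict.ofList c).get? "status" with _ | s
  · simp
  · by_cases h1 : s = "unhealthy" <;> by_cases h2 : s = "degraded" <;> simp_all

lemma ahs_fold_shift (l : List (String × List (String × String))) (acc : Nat) :
    l.foldl (fun a check => max a (ahsRank check.2)) acc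
      = max acc (l.foldl (fun a check => max a (ahsRank check.2)) 0) := by
  induction l generalizing acc with
  | nil => simp
  | cons c t ih =>
    simp only [List.foldl_cons]
    rw [ih (max acc (ahsRank c.2)), ih (max 0 (ahsRank c.2))]
    omega

lemma ahs_fold_char (l : List (String × List (String × String))) :
    l.foldl (fun a check => max a (ahsRank check.2)) 0
      = if l.any (fun check => ahsRank check.2 = 2) then 2
        else if l.any (fun check => ahsRank check.2 = 1) then 1 else 0 := by
  induction l with
  | nil => simp
  | cons c t ih =>
    simp only [List.foldl_cons, List.any_cons]
    rw [ahs_fold_shift, ih]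
    have h2 := ahsRank_le c.2
    by_cases e2 : ahsRank c.2 = 2 <;> by_cases e1 : ahsRank c.2 = 1 <;>
      by_cases t2 : t.any (fun check => ahsRank check.2 = 2) <;>
      by_cases t1 : t.any (fun check => ahsRank check.2 = 1) <;>
      simp [e2, e1, t2, t1] <;> omega

lemma ahs_contains_map (l : List (String × List (String × String))) (x : Option String) :
    ((l.map (fun check => (PySem.Dict.ofList check.2).get? "status")).contains x)
      = l.any (fun check => (PySem.Dict.ofList check.2).get? "status" = x) := by
  rw [Bool.eq_iff_iff]
  simp [List.mem_map]

-- ===== VERDICT (by name: the statement is the Claim_ definition above) =====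
theorem aggregate_health_status_spec : Claim_equal_aggregate_health_status := by
  intro checks _
  unfold Spec_aggregate_health_status aggregate_health_status aggregate_health_status_alt
  simp only [ahs_fold_char, ahs_contains_map, ahsRank_eq_two, ahsRank_eq_one]
  cases hu : checks.any (fun check => decide ((PySem.Dict.ofList check.2).get? "status" = some "unhealthy")) <;>
  cases hd : checks.any (fun check => decide ((PySem.Dict.ofList check.2).get? "status" = some "degraded")) <;>
    simp
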